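-- pv_equiv track=rewrite | github.com/Phoenix-Alpha05/MediRangex | app/services/operations_forecast_engine.py | _derive_system_status
-- ===== SOURCE A (Python) =====
-- from typing import List, Tuple
--
-- def _derive_system_status(domain_risks: List[str]) -> str:
--     critical_count = sum(1 for r in domain_risks if r == "CRITICAL")
--     high_or_above_count = sum(1 for r in domain_risks if r in ("HIGH", "CRITICAL"))
--
--     if critical_count >= 2:
--         return "SURGE"
--     if high_or_above_count >= 2:
--         return "STRAINED"
--     return "NORMAL"
-- ===== SOURCE B (Python) =====
-- def _derive_system_status(domain_risks):
--     # Top-2 selection: map each risk to a severity score (CRITICAL=2, HIGH=1,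
--     # else 0) and track the two largest scores seen; the second-largest score
--     # alone determines the status: 2 -> SURGE (two criticals), >=1 -> STRAINED
--     # (two at HIGH-or-above), else NORMAL.
--     best = 0
--     second = 0
--     for r in domain_risks:
--         s = 2 if r == "CRITICAL" else (1 if r == "HIGH" else 0)
--         if s > best:
--             best, second = s, best
--         elif s > second:
--             second = s
--     if second == 2:
--         return "SURGE"
--     if second >= 1:
--         return "STRAINED"
--     return "NORMAL"
-- ===== Notes on version B (the rewrite author's own statement) =====
-- stated objective: alternative
-- what changed: Replaces threshold counting (count CRITICALs, count HIGH-or-above, compare with 2) by an order-statistic algorithm: map risks to severity scores, maintain the two largest scores in one pass, and read the status off the second-largest score alone.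
import Mathlib
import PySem

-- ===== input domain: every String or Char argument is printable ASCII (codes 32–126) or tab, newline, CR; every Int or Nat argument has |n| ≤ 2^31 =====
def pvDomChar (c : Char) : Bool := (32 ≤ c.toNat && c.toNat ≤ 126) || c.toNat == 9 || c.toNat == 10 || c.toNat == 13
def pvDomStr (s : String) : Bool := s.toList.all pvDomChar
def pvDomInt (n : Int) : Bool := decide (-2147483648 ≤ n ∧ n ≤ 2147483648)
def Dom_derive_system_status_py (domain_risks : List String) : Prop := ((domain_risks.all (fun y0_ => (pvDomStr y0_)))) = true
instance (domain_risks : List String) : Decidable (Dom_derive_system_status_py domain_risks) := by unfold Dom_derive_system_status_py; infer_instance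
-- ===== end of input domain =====

-- B replaces A's threshold counting by an order-statistic algorithm: map each risk to a
-- severity score and keep the two largest scores; the second-largest alone decides the status.

-- ===== PORT A =====
def derive_system_status_py (domain_risks : List String) : String :=
  let critical_count : Int :=
    domain_risks.foldl (fun acc r => if r = "CRITICAL" then acc + 1 else acc) 0
  let high_or_above_count : Int :=
    domain_risks.foldl (fun acc r => if r = "HIGH" ∨ r = "CRITICAL" then acc + 1 else acc) 0
  if critical_count ≥ 2 then "SURGE"
  else if high_or_above_count ≥ 2 then "STRAINED"
  else "NORMAL"

-- ===== PORT B =====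
def derive_system_status_py_alt (domain_risks : List String) : String :=
  let tops : Int × Int :=
    domain_risks.foldl
      (fun p r =>
        let s : Int := if r = "CRITICAL" then 2 else if r = "HIGH" then 1 else 0
        if s > p.1 then (s, p.1)
        else if s > p.2 then (p.1, s)
        else p)
      (0, 0)
  if tops.2 = 2 then "SURGE"
  else if tops.2 ≥ 1 then "STRAINED"
  else "NORMAL"

-- ===== PRECONDITION & SPEC =====
def Spec_derive_system_status_py (domain_risks : List String) (out : String) : Prop := out = derive_system_status_py_alt domain_risks
instance (domain_risks : List String) (out : String) : Decidable (Spec_derive_system_status_py domain_risks out) := by unfold Spec_derive_system_status_py; infer_instance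

-- ===== CLAIM =====
def Claim_equal_derive_system_status_py : Prop := ∀ (domain_risks : List String), Dom_derive_system_status_py domain_risks → Spec_derive_system_status_py domain_risks (derive_system_status_py domain_risks)

-- ===== LEMMAS AND PROOFS =====

-- A's counters in terms of List.count.
theorem foldA_crit (l : List String) (n : Int) :
    l.foldl (fun acc r => if r = "CRITICAL" then acc + 1 else acc) n
      = n + (l.count "CRITICAL" : Int) := by
  induction l generalizing n with
  | nil => simp
  | cons x xs ih =>
    by_cases hx : x = "CRITICAL" <;>
      simp [List.foldl, List.count_cons, hx, ih] <;> ring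

theorem foldA_high (l : List String) (n : Int) :
    l.foldl (fun acc r => if r = "HIGH" ∨ r = "CRITICAL" then acc + 1 else acc) n
      = n + (l.count "CRITICAL" : Int) + (l.count "HIGH" : Int) := by
  induction l generalizing n with
  | nil => simp
  | cons x xs ih =>
    by_cases hc : x = "CRITICAL"
    · simp [List.foldl, List.count_cons, hc, ih]; ring
    · by_cases hh : x = "HIGH" <;>
        simp [List.foldl, List.count_cons, hc, hh, ih] <;> ring

-- the values of B's two maxima in terms of the counts
def bestOf (c h : Nat) : Int := if 1 ≤ c then 2 else if 1 ≤ h then 1 else 0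
def secondOf (c h : Nat) : Int := if 2 ≤ c then 2 else if 2 ≤ c + h then 1 else 0

-- B's top-2 fold computes (bestOf, secondOf) of the CRITICAL/HIGH counts.
set_option maxHeartbeats 2000000 in
theorem foldB_eq (l : List String) :
    l.foldl
      (fun p r =>
        let s : Int := if r = "CRITICAL" then 2 else if r = "HIGH" then 1 else 0
        if s > p.1 then (s, p.1)
        else if s > p.2 then (p.1, s)
        else p)
      (0, 0)
      = (bestOf (l.count "CRITICAL") (l.count "HIGH"),
         secondOf (l.count "CRITICAL") (l.count "HIGH")) := by
  induction l using List.reverseRecOn with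
  | nil => simp [bestOf, secondOf]
  | append_singleton xs x ih =>
    rw [List.foldl_append, ih]
    simp only [List.foldl, List.count_append, List.count_singleton]
    generalize xs.count "CRITICAL" = c
    generalize xs.count "HIGH" = h
    by_cases hc : x = "CRITICAL"
    · simp only [hc, bestOf, secondOf]
      norm_num
      split_ifs <;> simp_all [Prod.ext_iff] <;> try omega
    · by_cases hh : x = "HIGH"
      · simp only [hh, bestOf, secondOf]
        norm_num
        split_ifs <;> simp_all [Prod.ext_iff] <;> try omega
      · simp only [hc, hh, bestOf, secondOf]
        norm_num
        split_ifs <;> simp_all [Prod.ext_iff] <;> try omega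

-- ===== VERDICT =====
theorem derive_system_status_py_spec : Claim_equal_derive_system_status_py := by
  intro l _
  unfold Spec_derive_system_status_py derive_system_status_py derive_system_status_py_alt
  rw [foldA_crit, foldA_high, foldB_eq]
  simp only [secondOf]
  split_ifs <;> first | rfl | omega
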